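-- pv_equiv track=rewrite | github.com/ezquire/python-challenges | sumswap.py | sumswap_brute_force
-- ===== SOURCE A (Python) =====
-- def sumswap_brute_force(arr1, arr2):
--     sum1 = sum(arr1)
--     sum2 = sum(arr2)
--     for a in arr1:
--         for b in arr2:
--             newSum1 = sum1 - a + b
--             newSum2 = sum2 - b + a
--             if newSum1 == newSum2:
--                 return (a,b)
-- ===== SOURCE B (Python) =====
-- def sumswap_brute_force(arr1, arr2):
--     d = sum(arr2) - sum(arr1)
--     if d % 2 != 0:
--         return None
--     half = d // 2
--     s2 = set(arr2)
--     for a in arr1: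
--         if a + half in s2:
--             return (a, a + half)
--     return None
-- ===== Notes on version B (the rewrite author's own statement) =====
-- stated objective: faster
-- what changed: Replaced the O(n*m) nested scan with a closed-form target (half the sum difference) looked up in a set of arr2, one pass over arr1.
import Mathlib
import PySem

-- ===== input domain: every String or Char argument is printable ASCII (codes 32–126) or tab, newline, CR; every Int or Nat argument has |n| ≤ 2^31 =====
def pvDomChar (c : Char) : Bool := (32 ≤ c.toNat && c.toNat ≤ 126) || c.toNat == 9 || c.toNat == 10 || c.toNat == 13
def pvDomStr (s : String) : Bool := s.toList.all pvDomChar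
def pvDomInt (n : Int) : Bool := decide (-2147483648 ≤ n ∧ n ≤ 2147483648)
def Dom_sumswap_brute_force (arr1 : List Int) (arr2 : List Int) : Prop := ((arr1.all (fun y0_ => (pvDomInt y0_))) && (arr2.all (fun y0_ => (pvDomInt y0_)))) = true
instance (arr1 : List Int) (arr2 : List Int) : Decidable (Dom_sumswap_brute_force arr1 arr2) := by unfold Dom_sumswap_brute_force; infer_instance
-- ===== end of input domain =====

-- B replaces A's O(n·m) nested scan by the closed-form needed partner b = a + (sum2-sum1)/2
-- looked up in a set of arr2 — one pass over arr1 (objective: faster, asymptotic).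

-- ===== PORT A =====
-- inner 'for b in arr2' loop with early return
def pvAInner (sum1 sum2 a : Int) : List Int → Option (Int × Int)
  | [] => none
  | b :: bs => if sum1 - a + b = sum2 - b + a then some (a, b) else pvAInner sum1 sum2 a bs

-- outer 'for a in arr1' loop
def pvAOuter (sum1 sum2 : Int) (arr2 : List Int) : List Int → Option (Int × Int)
  | [] => none
  | a :: as =>
    match pvAInner sum1 sum2 a arr2 with
    | some r => some r
    | none => pvAOuter sum1 sum2 arr2 as

def sumswap_brute_force (arr1 : List Int) (arr2 : List Int) : Option (Int × Int) :=
  pvAOuter (arr1.foldl (· + ·) 0) (arr2.foldl (· + ·) 0) arr2 arr1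

-- ===== PORT B =====
-- 'for a in arr1: if a + half in s2: return (a, a+half)'
def pvBLoop (half : Int) (s2 : PySem.Set Int) : List Int → Option (Int × Int)
  | [] => none
  | a :: as => if PySem.Set.contains s2 (a + half) then some (a, a + half) else pvBLoop half s2 as

def sumswap_brute_force_alt (arr1 : List Int) (arr2 : List Int) : Option (Int × Int) :=
  let d := arr2.foldl (· + ·) 0 - arr1.foldl (· + ·) 0
  if PySem.Int.mod d 2 ≠ 0 then none
  else pvBLoop (PySem.Int.floordiv d 2) (PySem.Set.ofList arr2) arr1

-- ===== PRECONDITION & SPEC =====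
def Spec_sumswap_brute_force (arr1 : List Int) (arr2 : List Int) (out : Option (Int × Int)) : Prop := out = sumswap_brute_force_alt arr1 arr2
instance (arr1 : List Int) (arr2 : List Int) (out : Option (Int × Int)) : Decidable (Spec_sumswap_brute_force arr1 arr2 out) := by unfold Spec_sumswap_brute_force; infer_instance

-- ===== CLAIM (what is proved, stated in full; the proofs are below) =====
def Claim_equal_sumswap_brute_force : Prop := ∀ (arr1 : List Int) (arr2 : List Int), Dom_sumswap_brute_force arr1 arr2 → Spec_sumswap_brute_force arr1 arr2 (sumswap_brute_force arr1 arr2)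

-- ===== LEMMAS AND PROOFS =====

-- the inner condition holds iff b is exactly a + (sum2-sum1)/2 (which needs the difference even)
theorem pvAInner_odd (sum1 sum2 a : Int) (bs : List Int) (h : (sum2 - sum1) % 2 ≠ 0) :
    pvAInner sum1 sum2 a bs = none := by
  induction bs with
  | nil => rfl
  | cons b bs ih =>
    simp only [pvAInner]
    rw [if_neg, ih]
    intro hc
    apply h
    omega

theorem pvAInner_even (sum1 sum2 a half : Int) (bs : List Int) (h : sum2 - sum1 = 2 * half) :
    pvAInner sum1 sum2 a bs = if (a + half) ∈ bs then some (a, a + half) else none := by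
  induction bs with
  | nil => rfl
  | cons b bs ih =>
    simp only [pvAInner, List.mem_cons]
    by_cases hb : b = a + half
    · subst hb
      rw [if_pos (by omega), if_pos (Or.inl rfl)]
    · rw [if_neg (by omega), ih]
      have hiff : (a + half = b ∨ a + half ∈ bs) ↔ a + half ∈ bs := by
        constructor
        · rintro (h1 | h1)
          · exact absurd h1.symm hb
          · exact h1
        · exact Or.inr
      rw [if_congr hiff rfl rfl]

theorem pvAOuter_even (sum1 sum2 half : Int) (arr2 as : List Int) (h : sum2 - sum1 = 2 * half) :
    pvAOuter sum1 sum2 arr2 as = pvBLoop half (PySem.Set.ofList arr2) as := by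
  induction as with
  | nil => rfl
  | cons a as ih =>
    simp only [pvAOuter, pvBLoop]
    rw [pvAInner_even sum1 sum2 a half arr2 h]
    by_cases hm : (a + half) ∈ arr2
    · rw [if_pos hm, if_pos]
      rw [PySem.Set.contains_iff, PySem.Set.mem_ofList]
      exact hm
    · rw [if_neg hm, if_neg, ih]
      rw [PySem.Set.contains_iff, PySem.Set.mem_ofList]
      exact hm

theorem pvAOuter_odd (sum1 sum2 : Int) (arr2 as : List Int) (h : (sum2 - sum1) % 2 ≠ 0) :
    pvAOuter sum1 sum2 arr2 as = none := by
  induction as with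
  | nil => rfl
  | cons a as ih => simp only [pvAOuter, pvAInner_odd sum1 sum2 a arr2 h, ih]

-- ===== VERDICT (by name: the statement is the Claim_ definition above) =====
theorem sumswap_brute_force_spec : Claim_equal_sumswap_brute_force := by
  intro arr1 arr2 _
  unfold Spec_sumswap_brute_force sumswap_brute_force sumswap_brute_force_alt
  set sum1 := arr1.foldl (· + ·) 0 with hs1
  set sum2 := arr2.foldl (· + ·) 0 with hs2
  have hd : PySem.Int.floordiv (sum2 - sum1) 2 = (sum2 - sum1) / 2 := by
    simp [PySem.Int.floordiv, Int.fdiv_eq_ediv]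
  by_cases hodd : (sum2 - sum1) % 2 = 0
  · rw [if_neg (by simp [PySem.Int.mod, Int.fmod_eq_emod, hodd]), hd]
    exact pvAOuter_even _ _ _ _ _ (by omega)
  · rw [if_pos (by simp [PySem.Int.mod, Int.fmod_eq_emod, hodd])]
    exact pvAOuter_odd _ _ _ _ hodd
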